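-- pv_equiv track=rewrite | github.com/albert8943/unified-physics-informed-neural-surrogate-smib-tsa-cct-benchmark | scripts/plot_pe_input_cct_paper_figures.py | _confusion_from_per_scenario
-- ===== SOURCE A (Python) =====
-- from typing import Any, Dict, List, Sequence, Tuple
--
-- def _confusion_from_per_scenario(block: Dict[str, Any]) -> Tuple[int, int, int, int]:
--     """Return (tp, tn, fp, fn); positive class = stable."""
--     tp = tn = fp = fn = 0
--     for row in block.get("per_scenario") or []:
--         if "error" in row or "stable_label" not in row or "stable_pred" not in row:
--             continue
--         gt, pr = bool(row["stable_label"]), bool(row["stable_pred"])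
--         if gt and pr:
--             tp += 1
--         elif not gt and not pr:
--             tn += 1
--         elif not gt and pr:
--             fp += 1
--         else:
--             fn += 1
--     return tp, tn, fp, fn
-- ===== SOURCE B (Python) =====
-- from typing import Any, Dict, List, Sequence, Tuple
--
-- def _confusion_from_per_scenario(block: Dict[str, Any]) -> Tuple[int, int, int, int]:
--     """Return (tp, tn, fp, fn); positive class = stable."""
--     pairs = [(bool(r["stable_label"]), bool(r["stable_pred"]))
--              for r in (block.get("per_scenario") or [])
--              if "error" not in r and "stable_label" in r and "stable_pred" in r]
--     tp = sum(g and p for g, p in pairs)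
--     tn = sum(not g and not p for g, p in pairs)
--     fp = sum(not g and p for g, p in pairs)
--     fn = sum(g and not p for g, p in pairs)
--     return tp, tn, fp, fn
-- ===== Notes on version B (the rewrite author's own statement) =====
-- stated objective: alternative
-- what changed: Replaces the single accumulating loop with four-way branching by a filtered list of (gt, pr) pairs built once, followed by four independent boolean sums, one per confusion-matrix cell.
import Mathlib
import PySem

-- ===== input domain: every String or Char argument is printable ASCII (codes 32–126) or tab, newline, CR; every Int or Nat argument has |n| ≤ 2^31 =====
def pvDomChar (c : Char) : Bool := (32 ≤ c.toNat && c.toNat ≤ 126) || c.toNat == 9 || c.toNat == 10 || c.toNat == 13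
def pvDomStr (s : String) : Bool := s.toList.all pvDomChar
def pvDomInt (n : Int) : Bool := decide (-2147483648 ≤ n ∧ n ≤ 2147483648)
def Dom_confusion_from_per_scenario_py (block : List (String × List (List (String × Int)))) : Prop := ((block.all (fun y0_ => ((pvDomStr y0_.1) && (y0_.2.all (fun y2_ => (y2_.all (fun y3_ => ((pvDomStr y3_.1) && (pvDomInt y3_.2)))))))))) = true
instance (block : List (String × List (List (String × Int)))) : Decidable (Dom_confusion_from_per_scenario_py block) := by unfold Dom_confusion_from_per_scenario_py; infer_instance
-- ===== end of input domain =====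

-- B replaces A's single accumulating loop by a filtered pair list plus four independent boolean sums (alternative decomposition, same cost).


-- shared dict helpers: first-match lookup / key membership on the assoc-list encoding (via PySem.Dict; exact)
def pvRowGet (row : List (String × Int)) (k : String) : Int :=
  ((PySem.Dict.mk row).get? k).getD 0
def pvRowHas (row : List (String × Int)) (k : String) : Bool :=
  (PySem.Dict.mk row).contains k
-- block.get("per_scenario") or []: missing key and the empty list both give [] (exact for this value type)
def pvRows (block : List (String × List (List (String × Int)))) : List (List (String × Int)) :=
  ((PySem.Dict.mk block).get? "per_scenario").getD []

-- ===== PORT A =====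
def confusion_from_per_scenario_py (block : List (String × List (List (String × Int)))) : Int × Int × Int × Int :=
  (pvRows block).foldl (fun acc row =>
    let (tp, tn, fp, fn) := acc
    if pvRowHas row "error" || !pvRowHas row "stable_label" || !pvRowHas row "stable_pred" then
      (tp, tn, fp, fn)
    else
      let gt : Bool := pvRowGet row "stable_label" != 0
      let pr : Bool := pvRowGet row "stable_pred" != 0
      if gt && pr then (tp + 1, tn, fp, fn)
      else if !gt && !pr then (tp, tn + 1, fp, fn)
      else if !gt && pr then (tp, tn, fp + 1, fn)
      else (tp, tn, fp, fn + 1)) (0, 0, 0, 0)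

-- ===== PORT B =====
def confusion_from_per_scenario_py_alt (block : List (String × List (List (String × Int)))) : Int × Int × Int × Int :=
  let pairs : List (Bool × Bool) :=
    (pvRows block).filterMap (fun r =>
      if !pvRowHas r "error" && pvRowHas r "stable_label" && pvRowHas r "stable_pred" then
        some (pvRowGet r "stable_label" != 0, pvRowGet r "stable_pred" != 0)
      else none)
  let tp := (pairs.map (fun gp => if gp.1 && gp.2 then (1 : Int) else 0)).sum
  let tn := (pairs.map (fun gp => if !gp.1 && !gp.2 then (1 : Int) else 0)).sum
  let fp := (pairs.map (fun gp => if !gp.1 && gp.2 then (1 : Int) else 0)).sum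
  let fn := (pairs.map (fun gp => if gp.1 && !gp.2 then (1 : Int) else 0)).sum
  (tp, tn, fp, fn)

-- ===== PRECONDITION & SPEC =====
def Spec_confusion_from_per_scenario_py (block : List (String × List (List (String × Int)))) (out : Int × Int × Int × Int) : Prop := out = confusion_from_per_scenario_py_alt block
instance (block : List (String × List (List (String × Int)))) (out : Int × Int × Int × Int) : Decidable (Spec_confusion_from_per_scenario_py block out) := by unfold Spec_confusion_from_per_scenario_py; infer_instance

-- ===== CLAIM (what is proved, stated in full; the proofs are below) =====
def Claim_equal_confusion_from_per_scenario_py : Prop := ∀ (block : List (String × List (List (String × Int)))), Dom_confusion_from_per_scenario_py block → Spec_confusion_from_per_scenario_py block (confusion_from_per_scenario_py block)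

-- ===== LEMMAS AND PROOFS =====

def pvOk (r : List (String × Int)) : Bool :=
  !pvRowHas r "error" && pvRowHas r "stable_label" && pvRowHas r "stable_pred"
def pvGT (r : List (String × Int)) : Bool := pvRowGet r "stable_label" != 0
def pvPR (r : List (String × Int)) : Bool := pvRowGet r "stable_pred" != 0

-- the confusion counts of a row list, recursively
def pvSums : List (List (String × Int)) → Int × Int × Int × Int
  | [] => (0, 0, 0, 0)
  | r :: rs =>
    let s := pvSums rs
    if pvOk r then
      if pvGT r && pvPR r then (s.1 + 1, s.2.1, s.2.2.1, s.2.2.2)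
      else if !pvGT r && !pvPR r then (s.1, s.2.1 + 1, s.2.2.1, s.2.2.2)
      else if !pvGT r && pvPR r then (s.1, s.2.1, s.2.2.1 + 1, s.2.2.2)
      else (s.1, s.2.1, s.2.2.1, s.2.2.2 + 1)
    else s

lemma pv_guard (r : List (String × Int)) :
    (pvRowHas r "error" || !pvRowHas r "stable_label" || !pvRowHas r "stable_pred") = !pvOk r := by
  unfold pvOk
  cases pvRowHas r "error" <;> cases pvRowHas r "stable_label" <;>
    cases pvRowHas r "stable_pred" <;> rfl

-- A's loop adds pvSums to the accumulator
lemma pv_foldl_eq_sums (rows : List (List (String × Int))) (tp tn fp fn : Int) :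
    rows.foldl (fun acc row =>
      let (tp, tn, fp, fn) := acc
      if pvRowHas row "error" || !pvRowHas row "stable_label" || !pvRowHas row "stable_pred" then
        (tp, tn, fp, fn)
      else
        let gt : Bool := pvRowGet row "stable_label" != 0
        let pr : Bool := pvRowGet row "stable_pred" != 0
        if gt && pr then (tp + 1, tn, fp, fn)
        else if !gt && !pr then (tp, tn + 1, fp, fn)
        else if !gt && pr then (tp, tn, fp + 1, fn)
        else (tp, tn, fp, fn + 1)) (tp, tn, fp, fn)
    = (tp + (pvSums rows).1, tn + (pvSums rows).2.1, fp + (pvSums rows).2.2.1, fn + (pvSums rows).2.2.2) := by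
  induction rows generalizing tp tn fp fn with
  | nil => simp [pvSums]
  | cons r rs ih =>
    rw [List.foldl_cons]
    by_cases hok : pvOk r = true
    · have hne : (pvRowHas r "error" || !pvRowHas r "stable_label" || !pvRowHas r "stable_pred") = false := by
        rw [pv_guard, hok]; rfl
      cases hgt : pvGT r <;> cases hpr : pvPR r <;>
      · have hgt' := hgt; have hpr' := hpr
        unfold pvGT at hgt'; unfold pvPR at hpr'
        simp only [hne, hgt', hpr', Bool.and_self, Bool.and_true, Bool.and_false,
          Bool.true_and, Bool.false_and, Bool.not_true, Bool.not_false, Bool.false_eq_true,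
          reduceIte]
        rw [ih]
        simp only [pvSums, hok, hgt, hpr, Bool.and_self, Bool.and_true, Bool.and_false,
          Bool.true_and, Bool.false_and, Bool.not_true, Bool.not_false, Bool.false_eq_true,
          reduceIte, Prod.mk.injEq]
        and_intros <;> first | trivial | omega
    · have hok' : pvOk r = false := by revert hok; cases pvOk r <;> simp
      have hne : (pvRowHas r "error" || !pvRowHas r "stable_label" || !pvRowHas r "stable_pred") = true := by
        rw [pv_guard, hok']; rfl
      simp only [hne, reduceIte]
      rw [ih]
      simp only [pvSums, hok', Bool.false_eq_true, reduceIte]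

-- B's four sums over the filtered pairs compute pvSums
lemma pv_alt_eq_sums (rows : List (List (String × Int))) :
    (((rows.filterMap (fun r =>
        if !pvRowHas r "error" && pvRowHas r "stable_label" && pvRowHas r "stable_pred" then
          some (pvRowGet r "stable_label" != 0, pvRowGet r "stable_pred" != 0)
        else none)).map (fun gp => if gp.1 && gp.2 then (1 : Int) else 0)).sum,
     ((rows.filterMap (fun r =>
        if !pvRowHas r "error" && pvRowHas r "stable_label" && pvRowHas r "stable_pred" then
          some (pvRowGet r "stable_label" != 0, pvRowGet r "stable_pred" != 0)
        else none)).map (fun gp => if !gp.1 && !gp.2 then (1 : Int) else 0)).sum,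
     ((rows.filterMap (fun r =>
        if !pvRowHas r "error" && pvRowHas r "stable_label" && pvRowHas r "stable_pred" then
          some (pvRowGet r "stable_label" != 0, pvRowGet r "stable_pred" != 0)
        else none)).map (fun gp => if !gp.1 && gp.2 then (1 : Int) else 0)).sum,
     ((rows.filterMap (fun r =>
        if !pvRowHas r "error" && pvRowHas r "stable_label" && pvRowHas r "stable_pred" then
          some (pvRowGet r "stable_label" != 0, pvRowGet r "stable_pred" != 0)
        else none)).map (fun gp => if gp.1 && !gp.2 then (1 : Int) else 0)).sum)
    = pvSums rows := by
  induction rows with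
  | nil => simp [pvSums]
  | cons r rs ih =>
    by_cases hok : pvOk r = true
    · have hok' := hok; unfold pvOk at hok'
      cases hgt : pvGT r <;> cases hpr : pvPR r <;>
      · have hgt' := hgt; have hpr' := hpr
        unfold pvGT at hgt'; unfold pvPR at hpr'
        simp only [List.filterMap_cons, hok', hgt', hpr', List.map_cons, List.sum_cons,
          Bool.and_self, Bool.and_true, Bool.and_false, Bool.true_and, Bool.false_and,
          Bool.not_true, Bool.not_false, Bool.false_eq_true, reduceIte]
        simp only [pvSums, hok, hgt, hpr, Bool.and_self, Bool.and_true, Bool.and_false,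
          Bool.true_and, Bool.false_and, Bool.not_true, Bool.not_false, Bool.false_eq_true,
          reduceIte]
        rw [← ih]
        simp only [Prod.mk.injEq]
        and_intros <;> first | trivial | omega
    · have hok'' : pvOk r = false := by revert hok; cases pvOk r <;> simp
      have hok' : (!pvRowHas r "error" && pvRowHas r "stable_label" && pvRowHas r "stable_pred") = false := by
        revert hok''; unfold pvOk; intro h; exact h
      simp only [List.filterMap_cons, hok', Bool.false_eq_true, reduceIte]
      simp only [pvSums, hok'', Bool.false_eq_true, reduceIte]
      exact ih

-- ===== VERDICT (by name: the statement is the Claim_ definition above) =====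
theorem confusion_from_per_scenario_py_spec : Claim_equal_confusion_from_per_scenario_py := by
  intro block _
  unfold Spec_confusion_from_per_scenario_py
  simp only [confusion_from_per_scenario_py, confusion_from_per_scenario_py_alt]
  rw [pv_foldl_eq_sums, pv_alt_eq_sums]
  simp
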